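-- pv_equiv track=rewrite | github.com/albertoyg/advent-of-code-2022 | 3/3.py | grabVal
-- ===== SOURCE A (Python) =====
-- def grabVal(letter):
--     lets = ['a','b','c','d','e','f','g','h','i','j','k','l','m','n','o','p','q','r','s','t','u','v','w','x','y','z']
--     val = 1
--     for i in lets:
--         if letter == i:
--             return val
--         else:
--             val = val+1
--     for i in lets:
--         if letter.lower() == i:
--             return val
--         else:
--             val = val+1
-- ===== SOURCE B (Python) =====
-- def grabVal(letter):
--     if len(letter) == 1:
--         if 'a' <= letter <= 'z':
--             return ord(letter) - ord('a') + 1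
--         if 'A' <= letter <= 'Z':
--             return ord(letter) - ord('A') + 27
--     return None
-- ===== Notes on version B (the rewrite author's own statement) =====
-- stated objective: idiomatic
-- what changed: Replaces the two 26-step scan loops over a hand-written alphabet list with a closed-form ord()-based computation guarded by a single-character check.
import Mathlib
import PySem

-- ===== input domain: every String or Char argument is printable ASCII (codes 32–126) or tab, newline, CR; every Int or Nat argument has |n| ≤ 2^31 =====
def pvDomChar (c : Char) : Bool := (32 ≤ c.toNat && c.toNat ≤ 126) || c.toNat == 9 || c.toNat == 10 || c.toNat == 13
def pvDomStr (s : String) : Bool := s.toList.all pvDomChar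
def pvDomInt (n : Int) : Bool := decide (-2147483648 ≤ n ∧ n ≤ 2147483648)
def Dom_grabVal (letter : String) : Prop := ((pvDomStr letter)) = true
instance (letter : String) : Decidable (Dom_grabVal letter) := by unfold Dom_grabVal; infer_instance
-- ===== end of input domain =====

-- B replaces A's two 26-step scan loops with a closed-form char-code computation (idiomatic rewrite, same values).

-- ===== PORT A =====
-- the 26 single-letter strings A's list literal contains
def grabValLets : List String :=
  ["a","b","c","d","e","f","g","h","i","j","k","l","m",
   "n","o","p","q","r","s","t","u","v","w","x","y","z"]

-- one 'for i in lets: if <cmp> == i: return val; else: val = val+1' loop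
def grabValScan (target : String) (lets : List String) (val : Int) : Option Int :=
  match lets with
  | [] => none
  | i :: rest => if target = i then some val else grabValScan target rest (val + 1)

def grabVal (letter : String) : Option Int :=
  match grabValScan letter grabValLets 1 with
  | some v => some v
  | none => grabValScan (PySem.Str.lower letter) grabValLets 27   -- val is 27 after the first loop

-- ===== PORT B =====
def grabVal_alt (letter : String) : Option Int :=
  match letter.toList with
  | [c] =>
    if 'a' ≤ c ∧ c ≤ 'z' then some ((c.toNat : Int) - 97 + 1)
    else if 'A' ≤ c ∧ c ≤ 'Z' then some ((c.toNat : Int) - 65 + 27)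
    else none
  | _ => none

-- ===== PRECONDITION & SPEC =====
def Spec_grabVal (letter : String) (out : Option Int) : Prop := out = grabVal_alt letter
instance (letter : String) (out : Option Int) : Decidable (Spec_grabVal letter out) := by unfold Spec_grabVal; infer_instance

-- ===== CLAIM (what is proved, stated in full; the proofs are below) =====
def Claim_equal_grabVal : Prop := ∀ (letter : String), Dom_grabVal letter → Spec_grabVal letter (grabVal letter)

-- ===== LEMMAS AND PROOFS =====

theorem grabValScan_none (target : String) (lets : List String) (val : Int)
    (h : ∀ i ∈ lets, target ≠ i) : grabValScan target lets val = none := by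
  induction lets generalizing val with
  | nil => rfl
  | cons i rest ih =>
    simp only [grabValScan]
    rw [if_neg (h i (List.mem_cons_self ..))]
    exact ih _ (fun j hj => h j (List.mem_cons_of_mem _ hj))

theorem grabVal_single (c : Char) (hc : c.toNat ≤ 126) :
    grabVal (String.ofList [c]) = grabVal_alt (String.ofList [c]) := by
  have hofNat : Char.ofNat c.toNat = c := Char.ofNat_toNat c
  obtain ⟨n, hn, rfl⟩ : ∃ n, n ≤ 126 ∧ Char.ofNat n = c := ⟨c.toNat, hc, hofNat⟩
  interval_cases n <;> decide

theorem grabVal_not_single (letter : String) (h : letter.toList.length ≠ 1) :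
    grabVal (String.ofList letter.toList) = grabVal_alt (String.ofList letter.toList) := by
  have hne : ∀ (s : String), s.toList.length ≠ 1 → ∀ i ∈ grabValLets, s ≠ i := by
    intro s hs i hi hcontra
    subst hcontra
    fin_cases hi <;> simp_all
  have hlow : (PySem.Str.lower letter).toList.length = letter.toList.length := by
    simp [PySem.Str.toList_lower, PySem.Chars.lower]
  rw [String.ofList_toList]
  unfold grabVal
  rw [grabValScan_none _ _ _ (hne _ h),
      grabValScan_none _ _ _ (hne _ (by rw [hlow]; exact h))]
  unfold grabVal_alt
  match hm : letter.toList, h with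
  | [], _ => rfl
  | _ :: _ :: _, _ => rfl

-- ===== VERDICT (by name: the statement is the Claim_ definition above) =====
theorem grabVal_spec : Claim_equal_grabVal := by
  intro letter hdom
  unfold Spec_grabVal
  match hm : letter.toList with
  | [c] =>
    have hc : c.toNat ≤ 126 := by
      have := hdom
      unfold Dom_grabVal pvDomStr at this
      rw [hm] at this
      simp [pvDomChar] at this
      omega
    have := grabVal_single c hc
    rwa [← hm, String.ofList_toList] at this
  | [] =>
    have := grabVal_not_single letter (by rw [hm]; simp)
    rwa [String.ofList_toList] at this
  | _ :: _ :: _ =>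
    have := grabVal_not_single letter (by rw [hm]; simp)
    rwa [String.ofList_toList] at this
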